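-- pv_equiv track=rewrite | github.com/abimarticio/practice-problems | nlp/prob_02.py | get_dict_lines
-- ===== SOURCE A (Python) =====
-- def get_dict_lines(lines: list):
--     dict_lines = {}
--     for line in lines:
--         new_line = line.split(':')
--         key = new_line[0].strip()
--         value = new_line[1].strip()
--         if key not in dict_lines:
--             dict_lines[key] = []
--         dict_lines[key].append(value)
--     return dict_lines
-- ===== SOURCE B (Python) =====
-- def _pair(line):
--     p = line.split(':')
--     return p[0].strip(), p[1].strip()
--
--
-- def get_dict_lines(lines: list):
--     pairs = [_pair(line) for line in lines]
--     keys = dict.fromkeys(k for k, _ in pairs)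
--     return {k: [v for q, v in pairs if q == k] for k in keys}
-- ===== Notes on version B (the rewrite author's own statement) =====
-- stated objective: alternative
-- what changed: Replaces A's single accumulating dict-append loop by a two-phase decomposition: first split all lines into (key, value) pairs and dedup the keys in first-seen order, then build each group with a per-key filtered rescan of the pair list.
import Mathlib
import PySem

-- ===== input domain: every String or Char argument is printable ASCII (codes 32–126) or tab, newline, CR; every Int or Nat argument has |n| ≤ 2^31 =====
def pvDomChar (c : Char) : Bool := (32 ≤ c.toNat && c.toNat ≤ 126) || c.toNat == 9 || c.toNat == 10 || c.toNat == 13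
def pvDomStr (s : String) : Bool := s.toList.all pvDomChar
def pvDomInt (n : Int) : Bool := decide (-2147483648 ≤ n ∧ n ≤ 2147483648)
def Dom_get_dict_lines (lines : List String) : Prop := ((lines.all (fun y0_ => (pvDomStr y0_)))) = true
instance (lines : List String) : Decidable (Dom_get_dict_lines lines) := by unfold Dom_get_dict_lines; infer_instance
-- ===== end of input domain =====

-- B replaces A's single accumulating dict-append loop by a two-phase decomposition
-- (split all lines into pairs, dedup keys in first-seen order, then build each group
-- by a per-key filtered rescan): an alternative algorithm of similar cost.


-- ===== PORT A =====
def get_dict_lines (lines : List String) : List (String × List String) :=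
  (lines.foldl (fun dict_lines line =>
      let new_line := (PySem.Str.split? line ":").getD []   -- ':' is a non-empty literal sep, so split? is always `some`
      let key := PySem.Str.strip (PySem.List.pyGetD new_line 0 "")
      let value := PySem.Str.strip (PySem.List.pyGetD new_line 1 "")   -- IndexError when no ':' — excluded by Pre_
      let d := if dict_lines.contains key then dict_lines else dict_lines.insert key ([] : List String)
      d.modify key [] (fun vs => vs ++ [value])
    ) PySem.Dict.empty).items

-- ===== PORT B =====
def pvPair (line : String) : String × String :=
  let p := (PySem.Str.split? line ":").getD []
  (PySem.Str.strip (PySem.List.pyGetD p 0 ""), PySem.Str.strip (PySem.List.pyGetD p 1 ""))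

def get_dict_lines_alt (lines : List String) : List (String × List String) :=
  let pairs := lines.map pvPair
  let keys := PySem.List.dedup (pairs.map Prod.fst)
  keys.map (fun k => (k, (pairs.filter (fun q => q.1 == k)).map Prod.snd))

-- ===== PRECONDITION & SPEC =====
-- Pre_ excludes exactly the lines with no ':', on which Python A (and B) raise IndexError.
def Pre_get_dict_lines (lines : List String) : Prop :=
  lines.all (fun line => PySem.Str.isIn ":" line) = true
instance (lines : List String) : Decidable (Pre_get_dict_lines lines) := by unfold Pre_get_dict_lines; infer_instance

def pvWitness_get_dict_lines : List String := ["a: 1", "b:2", "a:3"]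

def Spec_get_dict_lines (lines : List String) (out : List (String × List String)) : Prop := out = get_dict_lines_alt lines
instance (lines : List String) (out : List (String × List String)) : Decidable (Spec_get_dict_lines lines out) := by unfold Spec_get_dict_lines; infer_instance

-- ===== CLAIM (what is proved, stated in full; the proofs are below) =====
def Claim_equal_get_dict_lines : Prop := ∀ (lines : List String), Dom_get_dict_lines lines → Pre_get_dict_lines lines → Spec_get_dict_lines lines (get_dict_lines lines)

-- ===== LEMMAS AND PROOFS =====

-- A's loop body, abstracted over the (key, value) pair extracted from the line.
def pvStep (d : PySem.Dict String (List String)) (p : String × String) : PySem.Dict String (List String) :=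
  (if d.contains p.1 then d else d.insert p.1 ([] : List String)).modify p.1 [] (fun vs => vs ++ [p.2])

-- B's result, as a function of the pair list.
def pvModel (ps : List (String × String)) : List (String × List String) :=
  (PySem.List.dedup (ps.map Prod.fst)).map
    (fun k => (k, (ps.filter (fun q => q.1 == k)).map Prod.snd))

lemma pvFind?_map_diag {β : Type} (ks : List String) (g : String → β) (k : String) :
    List.find? (fun q => q.1 == k) (ks.map (fun k' => (k', g k'))) =
      if k ∈ ks then some (k, g k) else none := by
  induction ks with
  | nil => simp
  | cons a ks ih =>
    by_cases h : a = k
    · subst h; simp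
    · simp [List.find?, Ne.symm h, h, ih]

lemma pvDedup_append_singleton {α : Type} [BEq α] [LawfulBEq α] (xs : List α) (x : α) :
    PySem.List.dedup (xs ++ [x]) =
      if x ∈ xs then PySem.List.dedup xs else PySem.List.dedup xs ++ [x] := by
  have h := PySem.Set.ofList_append (α := α) xs [x]
  simp only [PySem.List.dedup, h]
  by_cases hx : x ∈ xs
  · simp [PySem.Set.update, PySem.Set.add, PySem.Set.contains,
      List.foldl, PySem.Set.mem_ofList, hx]
  · simp [PySem.Set.update, PySem.Set.add, PySem.Set.contains,
      List.foldl, PySem.Set.mem_ofList, hx]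

lemma pvContains_model (ps : List (String × String)) (k : String) :
    (PySem.Dict.mk (pvModel ps)).contains k = true ↔ k ∈ ps.map Prod.fst := by
  simp only [PySem.Dict.contains, pvModel, List.any_map]
  rw [List.any_eq_true]
  constructor
  · rintro ⟨x, hx, hpx⟩
    simp only [Function.comp_def, beq_iff_eq] at hpx
    rw [← hpx]
    exact (PySem.Set.mem_ofList _ _).mp hx
  · intro hk
    exact ⟨k, (PySem.Set.mem_ofList _ _).mpr hk, by simp⟩

lemma pvGetD_model (ps : List (String × String)) (k : String) (hk : k ∈ ps.map Prod.fst) :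
    (PySem.Dict.mk (pvModel ps)).getD k [] =
      (ps.filter (fun q => q.1 == k)).map Prod.snd := by
  simp only [PySem.Dict.getD, PySem.Dict.get?, pvModel, PySem.List.dedup]
  rw [pvFind?_map_diag]
  simp [PySem.Set.mem_ofList, hk]

lemma pvModel_append (ps : List (String × String)) (p : String × String) :
    pvModel (ps ++ [p]) =
      if p.1 ∈ ps.map Prod.fst then
        (PySem.Set.ofList (ps.map Prod.fst)).map
          (fun k => (k, (ps.filter (fun q => q.1 == k)).map Prod.snd
                          ++ if p.1 == k then [p.2] else []))
      else
        pvModel ps ++ [(p.1, [p.2])] := by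
  unfold pvModel
  simp only [List.map_append, List.map_cons, List.map_nil]
  rw [show (List.map Prod.fst ps ++ [p.1]) = List.map Prod.fst ps ++ [p.1] from rfl,
    pvDedup_append_singleton]
  by_cases hmem : p.1 ∈ ps.map Prod.fst
  · simp only [hmem, if_true, List.map_cons, List.map_nil, PySem.List.dedup]
    refine List.map_congr_left (fun k _ => ?_)
    by_cases h : p.1 = k <;> simp [List.filter_append, h]
  · simp only [hmem, if_false, List.map_cons, List.map_nil, PySem.List.dedup, List.map_append]
    have hfilt : ∀ k, k ∈ PySem.Set.ofList (ps.map Prod.fst) →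
        List.filter (fun q => q.1 == k) [p] = [] := by
      intro k hk
      rw [PySem.Set.mem_ofList] at hk
      have : p.1 ≠ k := fun h => hmem (h ▸ hk)
      simp [this]
    refine congrArg₂ (· ++ ·) (List.map_congr_left (fun k hk => ?_)) ?_
    · simp [List.filter_append, hfilt k hk]
    · have : List.filter (fun q => q.1 == p.1) ps = [] := by
        rw [List.filter_eq_nil_iff]
        intro q hq h
        exact hmem (List.mem_map.mpr ⟨q, hq, by simpa using h⟩)
      simp [List.filter_append, this]

lemma pvStep_model (ps : List (String × String)) (p : String × String) :
    pvStep (PySem.Dict.mk (pvModel ps)) p = PySem.Dict.mk (pvModel (ps ++ [p])) := by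
  by_cases hmem : p.1 ∈ ps.map Prod.fst
  · have hc : (PySem.Dict.mk (pvModel ps)).contains p.1 = true :=
      (pvContains_model ps p.1).mpr hmem
    rw [pvModel_append, if_pos hmem]
    simp only [pvStep, hc, if_true, PySem.Dict.modify, pvGetD_model ps p.1 hmem,
      PySem.Dict.insert]
    congr 1
    unfold pvModel PySem.List.dedup
    rw [List.map_map]
    refine List.map_congr_left (fun k _ => ?_)
    by_cases h : k = p.1
    · subst h; simp
    · have h1 : (k == p.1) = false := by simp [h]
      have h2 : (p.1 == k) = false := by simp [Ne.symm h]
      simp [h2, h]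
  · have hc : ¬ (PySem.Dict.mk (pvModel ps)).contains p.1 = true :=
      fun h => hmem ((pvContains_model ps p.1).mp h)
    rw [pvModel_append, if_neg hmem]
    unfold pvStep
    rw [if_neg hc]
    -- inserting a fresh key appends (p.1, []) at the end
    have hins : (PySem.Dict.mk (pvModel ps)).insert p.1 ([] : List String) =
        PySem.Dict.mk (pvModel ps ++ [(p.1, [])]) := by
      simp [PySem.Dict.insert, hc]
    rw [hins]
    -- the freshly inserted dict contains p.1, and getD there is []
    have hfind : List.find? (fun q => q.1 == p.1) (pvModel ps) = none := by
      unfold pvModel PySem.List.dedup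
      rw [pvFind?_map_diag]
      simp [PySem.Set.mem_ofList, hmem]
    have hc2 : (PySem.Dict.mk (pvModel ps ++ [(p.1, [])])).contains p.1 = true := by
      simp [PySem.Dict.contains]
    have hget2 : (PySem.Dict.mk (pvModel ps ++ [(p.1, [])])).getD p.1 [] = [] := by
      simp [PySem.Dict.getD, PySem.Dict.get?, List.find?_append, hfind]
    simp only [PySem.Dict.modify, hget2, List.nil_append]
    simp only [PySem.Dict.insert, hc2, if_true, PySem.Dict.items]
    congr 1
    simp only [List.map_append]
    refine congrArg₂ (· ++ ·) ?_ (by simp)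
    conv_rhs => rw [show pvModel ps = (pvModel ps).map id from (List.map_id _).symm]
    refine List.map_congr_left (fun q hq => ?_)
    have hq1 : q.1 ≠ p.1 := by
      unfold pvModel PySem.List.dedup at hq
      obtain ⟨k, hk, rfl⟩ := List.mem_map.mp hq
      rw [PySem.Set.mem_ofList] at hk
      exact fun h => hmem (h ▸ hk)
    simp [hq1]

lemma pvFoldl_step (ps : List (String × String)) :
    ps.foldl pvStep PySem.Dict.empty = PySem.Dict.mk (pvModel ps) := by
  induction ps using List.reverseRecOn with
  | nil => rfl
  | append_singleton ps p ih =>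
    rw [List.foldl_append, List.foldl_cons, List.foldl_nil, ih, pvStep_model]

-- ===== VERDICT (by name: the statement is the Claim_ definition above) =====
theorem get_dict_lines_spec : Claim_equal_get_dict_lines := by
  intro lines _ _
  unfold Spec_get_dict_lines get_dict_lines get_dict_lines_alt
  have h : lines.foldl (fun dict_lines line =>
      let new_line := (PySem.Str.split? line ":").getD []
      let key := PySem.Str.strip (PySem.List.pyGetD new_line 0 "")
      let value := PySem.Str.strip (PySem.List.pyGetD new_line 1 "")
      let d := if dict_lines.contains key then dict_lines else dict_lines.insert key ([] : List String)
      d.modify key [] (fun vs => vs ++ [value])) PySem.Dict.empty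
      = (lines.map pvPair).foldl pvStep PySem.Dict.empty := by
    rw [List.foldl_map]
    rfl
  rw [h, pvFoldl_step]
  rfl
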